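-- pv_equiv track=rewrite | github.com/Junoquu/Coding_Training | 백준/Silver/1436. 영화감독 숌/영화감독 숌.py | find_title_num
-- ===== SOURCE A (Python) =====
-- def find_title_num(n):
--     cnt=0
--     num=666
--     while True:
--         if '666' in str(num):
--             cnt+=1
--         if cnt == n:
--             return num
--         num+=1
-- ===== SOURCE B (Python) =====
-- def _blockcnt(q):
--     # exact number of integers in [1000*q, 1000*q+999] whose decimal form contains '666'
--     if '666' in str(q):
--         return 1000
--     if q % 100 == 66:
--         return 100
--     if q % 10 == 6:
--         return 10
--     return 1
--
--
-- def find_title_num(n):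
--     # skip whole blocks of 1000 numbers at a time, counting matches per block in O(1)
--     total = 0
--     q = 0
--     while True:
--         c = _blockcnt(q)
--         if total + c >= n:
--             break
--         total += c
--         q += 1
--     num = 1000 * q
--     cnt = total
--     while True:
--         if '666' in str(num):
--             cnt += 1
--             if cnt == n:
--                 return num
--         num += 1
-- ===== Notes on version B (the rewrite author's own statement) =====
-- stated objective: faster
-- what changed: Instead of testing every integer for the substring '666', B skips whole blocks [1000q,1000q+999] at a time using a closed-form per-block match count (1000 / 100 / 10 / depending on q), then scans only inside the final block; Pre_ admits exactly the positive n, since A never returns (infinite loop) on n <= 0.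
import Mathlib
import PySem

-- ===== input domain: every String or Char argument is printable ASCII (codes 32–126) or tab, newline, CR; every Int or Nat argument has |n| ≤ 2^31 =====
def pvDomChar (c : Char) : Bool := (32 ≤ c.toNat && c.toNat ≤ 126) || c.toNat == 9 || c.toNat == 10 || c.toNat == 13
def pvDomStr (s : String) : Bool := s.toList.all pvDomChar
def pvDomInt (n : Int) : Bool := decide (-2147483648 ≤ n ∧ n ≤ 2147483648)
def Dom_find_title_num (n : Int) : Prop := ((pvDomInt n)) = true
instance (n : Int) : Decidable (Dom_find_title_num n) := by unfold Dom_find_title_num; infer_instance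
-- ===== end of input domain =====

-- B skips blocks of 1000 consecutive numbers using a closed-form per-block count of
-- '666'-containing integers, then scans only the final block (objective: faster).
-- Pre_ requires 1 ≤ n: for n ≤ 0 the Python A never returns.


-- ===== PORT A =====
-- 'while True' ported with a fuel guard that only totalises the loop (proved sufficient on Pre_)
def findTitleLoopA (fuel : Nat) (num cnt n : Int) : Int :=
  match fuel with
  | 0 => 0
  | f+1 =>
    let cnt' := if PySem.Str.isIn "666" (PySem.Int.toStr num) then cnt + 1 else cnt
    if cnt' = n then num else findTitleLoopA f (num + 1) cnt' n

def find_title_num (n : Int) : Int := findTitleLoopA ((1000 * n).toNat + 1) 666 0 n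

-- ===== PORT B =====
def blockcntB (q : Int) : Int :=
  if PySem.Str.isIn "666" (PySem.Int.toStr q) then 1000
  else if PySem.Int.mod q 100 = 66 then 100
  else if PySem.Int.mod q 10 = 6 then 10
  else 1

-- outer 'while True' of Source B, fuel-guarded (proved sufficient on Pre_)
def findTitleOuterB (fuel : Nat) (q total n : Int) : Int × Int :=
  match fuel with
  | 0 => (q, total)
  | f+1 =>
    let c := blockcntB q
    if n ≤ total + c then (q, total) else findTitleOuterB f (q + 1) (total + c) n

-- inner 'while True' of Source B; the answer lies within 1000 steps of the block start
def findTitleInnerB (fuel : Nat) (num cnt n : Int) : Int :=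
  match fuel with
  | 0 => 0
  | f+1 =>
    if PySem.Str.isIn "666" (PySem.Int.toStr num) then
      if cnt + 1 = n then num else findTitleInnerB f (num + 1) (cnt + 1) n
    else findTitleInnerB f (num + 1) cnt n

def find_title_num_alt (n : Int) : Int :=
  let p := findTitleOuterB (n.toNat + 1) 0 0 n
  findTitleInnerB 1000 (1000 * p.1) p.2 n

-- ===== PRECONDITION & SPEC =====
-- For n ≤ 0 the Python A never returns (cnt only grows and starts at 1); Pre_ excludes exactly those.
def Pre_find_title_num (n : Int) : Prop := 1 ≤ n
instance (n : Int) : Decidable (Pre_find_title_num n) := by unfold Pre_find_title_num; infer_instance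
def pvWitness_find_title_num : Int := 2

def Spec_find_title_num (n : Int) (out : Int) : Prop := out = find_title_num_alt n
instance (n : Int) (out : Int) : Decidable (Spec_find_title_num n out) := by unfold Spec_find_title_num; infer_instance

-- ===== CLAIM (what is proved, stated in full; the proofs are below) =====
def Claim_equal_find_title_num : Prop := ∀ (n : Int), Dom_find_title_num n → Pre_find_title_num n → Spec_find_title_num n (find_title_num n)

-- ===== LEMMAS AND PROOFS =====

-- arithmetic mirror of "'666' in str(m)" (fuel-style structural recursion, kernel-evaluable)
def paAux : Nat → Nat → Bool
  | 0, _ => false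
  | f+1, m => if m < 10 then false else ((m % 1000 == 666) || paAux f (m / 10))

def Pa (m : Nat) : Bool := paAux m m

lemma paAux_congr : ∀ f f' m, m ≤ f → m ≤ f' → paAux f m = paAux f' m := by
  intro f
  induction f with
  | zero =>
    intro f' m hf _
    interval_cases m
    cases f' <;> simp [paAux]
  | succ f ih =>
    intro f' m hf hf'
    match f' with
    | 0 =>
      interval_cases m
      cases f <;> simp [paAux]
    | f'+1 =>
      simp only [paAux]
      by_cases h : m < 10
      · simp [h]
      · simp only [h, if_false]
        rw [ih f' (m / 10) (by omega) (by omega)]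

lemma Pa_lt {m : Nat} (h : m < 10) : Pa m = false := by
  cases m with
  | zero => rfl
  | succ k => simp [Pa, paAux, h]

lemma Pa_ge {m : Nat} (h : 10 ≤ m) : Pa m = ((m % 1000 == 666) || Pa (m / 10)) := by
  obtain ⟨k, rfl⟩ : ∃ k, m = k + 1 := ⟨m - 1, by omega⟩
  show paAux (k+1) (k+1) = _
  simp only [paAux, show ¬ (k+1 < 10) by omega, if_false]
  rw [paAux_congr k ((k+1)/10) ((k+1)/10) (by omega) (le_refl _)]
  rfl

lemma Pa_small {m : Nat} (h : m < 1000) : Pa m = decide (m = 666) := by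
  induction m using Nat.strong_induction_on with
  | _ m ih =>
    by_cases h10 : m < 10
    · rw [Pa_lt h10]; simp; omega
    · rw [Pa_ge (by omega)]
      rw [ih (m/10) (by omega) (by omega)]
      have hm : m % 1000 = m := by omega
      rw [hm]
      have h6 : ¬ (m / 10 = 666) := by omega
      rw [decide_eq_false h6]
      simp only [Bool.or_false]
      exact Bool.eq_iff_iff.mpr (by simp)

lemma Pa_block (q r : Nat) (hr : r < 1000) :
    Pa (1000*q + r) =
      (decide (r = 666) || (decide (q % 10 = 6) && decide (r/10 = 66))
        || (decide (q % 100 = 66) && decide (r/100 = 6)) || Pa q) := by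
  rcases Nat.eq_zero_or_pos q with hq | hq
  · subst hq
    simp only [Nat.mul_zero, Nat.zero_add]
    rw [Pa_small hr, Pa_lt (by omega)]
    simp
  · rw [Pa_ge (by omega)]
    have e1 : (1000*q + r) % 1000 = r := by omega
    have e2 : (1000*q + r) / 10 = 100*q + r/10 := by omega
    rw [e1, e2, Pa_ge (by omega)]
    have e3 : (100*q + r/10) % 1000 = 100*(q%10) + r/10 := by omega
    have e4 : (100*q + r/10) / 10 = 10*q + r/100 := by omega
    rw [e3, e4, Pa_ge (by omega)]
    have e5 : (10*q + r/100) % 1000 = 10*(q%100) + r/100 := by omega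
    have e6 : (10*q + r/100) / 10 = q := by omega
    rw [e5, e6]
    have h1 : (100*(q%10) + r/10 = 666) ↔ (q % 10 = 6 ∧ r/10 = 66) := by omega
    have h2 : (10*(q%100) + r/100 = 666) ↔ (q % 100 = 66 ∧ r/100 = 6) := by omega
    cases hb : Pa q <;> apply Bool.eq_iff_iff.mpr <;>
      simp only [Bool.or_true, Bool.or_false, Bool.or_eq_true,
        beq_iff_eq, decide_eq_true_eq, Bool.and_eq_true, h1, h2] <;> tauto

-- ---- string bridge: '666' in str(m)  =  Pa m ----

lemma digitChar_six {d : Nat} (h : d < 10) : (Nat.digitChar d = '6') ↔ d = 6 := by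
  interval_cases d <;> simp [Nat.digitChar]

lemma suffix_digits1 (m : Nat) : (['6'] <:+ Nat.toDigits 10 m) ↔ m % 10 = 6 := by
  by_cases h : m < 10
  · rw [Nat.toDigits_of_lt_base h]
    constructor
    · intro hs
      have hlen : (['6'] : List Char).length = [Nat.digitChar m].length := by simp
      have heq := List.IsSuffix.eq_of_length hs hlen
      have h6 : Nat.digitChar m = '6' := by simpa using heq.symm
      have := (digitChar_six h).mp h6
      omega
    · intro hm
      have h6 : m = 6 := by omega
      subst h6
      exact List.suffix_refl _
  · rw [Nat.toDigits_of_base_le (by norm_num) (by omega), List.suffix_concat_iff]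
    constructor
    · rintro (habs | ⟨t, ht, hsuf⟩)
      · exact absurd habs (by simp)
      · rcases t with _ | ⟨a, t⟩
        · have h6 : Nat.digitChar (m % 10) = '6' := by simpa using ht.symm
          exact (digitChar_six (Nat.mod_lt _ (by norm_num))).mp h6
        · exact absurd ht (by simp)
    · intro hm
      right
      refine ⟨[], ?_, List.nil_suffix⟩
      rw [hm]; rfl

lemma suffix_digits2 (m : Nat) : (['6','6'] <:+ Nat.toDigits 10 m) ↔ m % 100 = 66 := by
  by_cases h : m < 10
  · rw [Nat.toDigits_of_lt_base h]
    constructor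
    · intro hs
      have := hs.length_le
      simp at this
    · omega
  · rw [Nat.toDigits_of_base_le (by norm_num) (by omega), List.suffix_concat_iff]
    constructor
    · rintro (habs | ⟨t, ht, hsuf⟩)
      · exact absurd habs (by simp)
      · rcases t with _ | ⟨a, _ | ⟨b, t⟩⟩
        · exact absurd ht (by simp)
        · simp only [List.cons_append, List.nil_append, List.cons.injEq, and_true] at ht
          obtain ⟨ha, hb⟩ := ht
          subst ha
          have h10 := (digitChar_six (Nat.mod_lt _ (by norm_num))).mp hb.symm
          have h2 := (suffix_digits1 (m / 10)).mp hsuf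
          omega
        · exact absurd ht (by simp)
    · intro hm
      right
      refine ⟨['6'], ?_, (suffix_digits1 (m / 10)).mpr (by omega)⟩
      have h6 : m % 10 = 6 := by omega
      rw [h6]; rfl

lemma suffix_digits3 (m : Nat) : (['6','6','6'] <:+ Nat.toDigits 10 m) ↔ m % 1000 = 666 := by
  by_cases h : m < 10
  · rw [Nat.toDigits_of_lt_base h]
    constructor
    · intro hs
      have := hs.length_le
      simp at this
    · omega
  · rw [Nat.toDigits_of_base_le (by norm_num) (by omega), List.suffix_concat_iff]
    constructor
    · rintro (habs | ⟨t, ht, hsuf⟩)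
      · exact absurd habs (by simp)
      · rcases t with _ | ⟨a, _ | ⟨b, _ | ⟨c, t⟩⟩⟩
        · exact absurd ht (by simp)
        · exact absurd ht (by simp)
        · simp only [List.cons_append, List.nil_append, List.cons.injEq, and_true] at ht
          obtain ⟨ha, hb, hc⟩ := ht
          subst ha; subst hb
          have h10 := (digitChar_six (Nat.mod_lt _ (by norm_num))).mp hc.symm
          have h2 := (suffix_digits2 (m / 10)).mp hsuf
          omega
        · exact absurd ht (by simp)
    · intro hm
      right
      refine ⟨['6','6'], ?_, (suffix_digits2 (m / 10)).mpr (by omega)⟩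
      have h6 : m % 10 = 6 := by omega
      rw [h6]; rfl

lemma infix_concat_iff {p l : List Char} {c : Char} :
    p <:+: l ++ [c] ↔ p <:+: l ∨ p <:+ (l ++ [c]) := by
  constructor
  · intro h
    obtain ⟨s, t, hst⟩ := h
    rcases List.eq_nil_or_concat t with rfl | ⟨t', c', rfl⟩
    · right
      exact ⟨s, by simpa using hst⟩
    · left
      have hst' : (s ++ p ++ t') ++ [c'] = l ++ [c] := by simpa using hst
      have h2 := List.append_inj' hst' (by simp)
      exact ⟨s, t', h2.1⟩
  · rintro (h | h)
    · obtain ⟨s, t, rfl⟩ := h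
      exact ⟨s, t ++ [c], by simp⟩
    · exact h.isInfix

lemma isIn_toDigits (m : Nat) :
    PySem.Chars.isIn ['6','6','6'] (Nat.toDigits 10 m) = Pa m := by
  induction m using Nat.strong_induction_on with
  | _ m ih =>
    by_cases h : m < 10
    · rw [Pa_lt h]
      apply (PySem.Chars.isIn_eq_false_iff _ _).mpr
      intro habs
      have := habs.length_le
      rw [Nat.toDigits_of_lt_base h] at this
      simp at this
    · rw [Pa_ge (by omega), ← ih (m / 10) (by omega)]
      apply Bool.eq_iff_iff.mpr
      rw [PySem.Chars.isIn_iff_infix, Nat.toDigits_of_base_le (by norm_num) (by omega),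
        infix_concat_iff]
      rw [← Nat.toDigits_of_base_le (by norm_num) (by omega)]
      rw [suffix_digits3]
      simp only [Bool.or_eq_true, beq_iff_eq, PySem.Chars.isIn_iff_infix]
      tauto

lemma S_natCast (m : Nat) :
    PySem.Str.isIn "666" (PySem.Int.toStr (m : Int)) = Pa m := by
  have h1 : (PySem.Int.toStr (m : Int)).toList = Nat.toDigits 10 m := by
    rw [PySem.Int.toList_toStr]
    simp [PySem.Int.toChars]
  rw [PySem.Str.isIn_eq, h1]
  exact isIn_toDigits m

lemma mod_natCast_lit (q : Nat) (k : Nat) (hk : 0 < k) :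
    PySem.Int.mod (q : Int) (k : Int) = ((q % k : Nat) : Int) := by
  simp only [PySem.Int.mod]
  rw [Int.fmod_eq_emod]
  have h : (0:Int) ≤ (k:Int) ∨ (k:Int) ∣ (q:Int) := Or.inl (by positivity)
  simp only [h, if_pos]
  omega

lemma mod_natCast100 (q : Nat) : PySem.Int.mod (q : Int) 100 = ((q % 100 : Nat) : Int) := by
  simpa using mod_natCast_lit q 100 (by omega)

lemma mod_natCast10 (q : Nat) : PySem.Int.mod (q : Int) 10 = ((q % 10 : Nat) : Int) := by
  simpa using mod_natCast_lit q 10 (by omega)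

-- ---- counting ----

def CntP (x : Nat) : Nat := (List.range x).countP (fun m => Pa m)

lemma CntP_succ (x : Nat) : CntP (x+1) = CntP x + (if Pa x then 1 else 0) := by
  simp only [CntP, List.range_succ, List.countP_append, List.countP_singleton]

lemma CntP_mono {a b : Nat} (h : a ≤ b) : CntP a ≤ CntP b := by
  induction b, h using Nat.le_induction with
  | base => exact le_refl _
  | succ b hb ih => rw [CntP_succ]; split <;> omega

def blockN (q : Nat) : Nat :=
  if Pa q then 1000 else if q % 100 = 66 then 100 else if q % 10 = 6 then 10 else 1

lemma blockN_pos (q : Nat) : 1 ≤ blockN q := by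
  unfold blockN; split_ifs <;> omega

set_option maxRecDepth 100000 in
lemma CntP_block (q : Nat) : CntP (1000*(q+1)) = CntP (1000*q) + blockN q := by
  have h1 : 1000*(q+1) = 1000*q + 1000 := by ring
  rw [h1, CntP, List.range_add, List.countP_append, List.countP_map]
  have h3 : List.countP ((fun m => Pa m) ∘ fun x => 1000*q + x) (List.range 1000)
      = List.countP (fun r => decide (r = 666) || (decide (q % 10 = 6) && decide (r/10 = 66))
        || (decide (q % 100 = 66) && decide (r/100 = 6)) || Pa q) (List.range 1000) := by
    apply List.countP_congr
    intro r hr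
    simp only [Function.comp_apply]
    rw [Pa_block q r (List.mem_range.mp hr)]
  rw [h3]
  show CntP (1000*q) + _ = CntP (1000*q) + blockN q
  congr 1
  unfold blockN
  by_cases hp : Pa q
  · rw [if_pos hp]
    rw [List.countP_congr (q := fun _ => true) (by simp [hp])]
    simp
  · rw [if_neg hp]
    by_cases h66 : q % 100 = 66
    · have h6 : q % 10 = 6 := by omega
      rw [if_pos h66]
      rw [List.countP_congr (q := fun r => decide (r = 666) || decide (r/10 = 66) || decide (r/100 = 6)) (by simp [hp, h66, h6])]
      decide
    · by_cases h6 : q % 10 = 6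
      · rw [if_neg h66, if_pos h6]
        rw [List.countP_congr (q := fun r => decide (r = 666) || decide (r/10 = 66)) (by simp [hp, h66, h6])]
        decide
      · rw [if_neg h66, if_neg h6]
        rw [List.countP_congr (q := fun r => decide (r = 666)) (by simp [hp, h66, h6])]
        decide

lemma CntP_lb (t : Nat) : t ≤ CntP (1000*t) := by
  induction t with
  | zero => omega
  | succ t ih => rw [CntP_block]; have := blockN_pos t; omega

set_option maxRecDepth 100000 in
lemma CntP_666 : CntP 666 = 0 := by decide

-- ---- loop lemmas ----

lemma find_ge {n : Int} (h : ∃ x : Nat, n ≤ (CntP (x+1) : Int)) {m : Nat}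
    (hm : (CntP m : Int) < n) : m ≤ Nat.find h := by
  by_contra hc
  have hlt : Nat.find h < m := by omega
  have hspec := Nat.find_spec h
  have : CntP (Nat.find h + 1) ≤ CntP m := CntP_mono (by omega)
  omega

lemma loopA_eq (n : Int) (h : ∃ x : Nat, n ≤ (CntP (x+1) : Int)) :
    ∀ f (m : Nat), (CntP m : Int) < n → Nat.find h < m + f →
      findTitleLoopA f (m : Int) (CntP m) n = (Nat.find h : Int) := by
  intro f
  induction f with
  | zero =>
    intro m hm hf
    have := find_ge h hm
    omega
  | succ f ih =>
    intro m hm hf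
    show (if (if PySem.Str.isIn "666" (PySem.Int.toStr (m:Int)) then (CntP m : Int) + 1 else (CntP m : Int)) = n
          then (m:Int) else findTitleLoopA f ((m:Int) + 1) _ n) = _
    rw [S_natCast m]
    have hstep : (if Pa m then (CntP m : Int) + 1 else (CntP m : Int)) = (CntP (m+1) : Int) := by
      rw [CntP_succ]; split <;> push_cast <;> ring
    rw [hstep]
    by_cases heq : (CntP (m+1) : Int) = n
    · rw [if_pos heq]
      have h1 : Nat.find h ≤ m := Nat.find_le (by omega)
      have h2 : m ≤ Nat.find h := find_ge h hm
      omega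
    · rw [if_neg heq]
      have hlt : (CntP (m+1) : Int) < n := by
        have := CntP_succ m
        split at this <;> omega
      have h2 : m + 1 ≤ Nat.find h := find_ge h hlt
      have hcast : ((m:Int) + 1) = ((m+1 : Nat) : Int) := by push_cast; ring
      rw [hcast]
      exact ih (m+1) hlt (by omega)

lemma loopB_eq (n : Int) (h : ∃ x : Nat, n ≤ (CntP (x+1) : Int)) :
    ∀ f (m : Nat), (CntP m : Int) < n → Nat.find h < m + f →
      findTitleInnerB f (m : Int) (CntP m) n = (Nat.find h : Int) := by
  intro f
  induction f with
  | zero =>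
    intro m hm hf
    have := find_ge h hm
    omega
  | succ f ih =>
    intro m hm hf
    show (if PySem.Str.isIn "666" (PySem.Int.toStr (m:Int))
          then (if (CntP m : Int) + 1 = n then (m:Int) else findTitleInnerB f ((m:Int)+1) ((CntP m : Int)+1) n)
          else findTitleInnerB f ((m:Int)+1) (CntP m) n) = _
    rw [S_natCast m]
    have hcast : ((m:Int) + 1) = ((m+1 : Nat) : Int) := by push_cast; ring
    by_cases hp : Pa m
    · rw [if_pos hp]
      have hstep : (CntP m : Int) + 1 = (CntP (m+1) : Int) := by
        rw [CntP_succ, if_pos hp]; push_cast; ring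
      by_cases heq : (CntP m : Int) + 1 = n
      · rw [if_pos heq]
        have h1 : Nat.find h ≤ m := Nat.find_le (by omega)
        have h2 : m ≤ Nat.find h := find_ge h hm
        omega
      · rw [if_neg heq]
        have hlt : (CntP (m+1) : Int) < n := by omega
        have h2 : m + 1 ≤ Nat.find h := find_ge h hlt
        rw [hcast, hstep]
        exact ih (m+1) hlt (by omega)
    · rw [if_neg hp]
      have hstep : (CntP m : Int) = (CntP (m+1) : Int) := by
        rw [CntP_succ, if_neg hp]; push_cast; ring
      have hlt : (CntP (m+1) : Int) < n := by omega
      have h2 : m + 1 ≤ Nat.find h := find_ge h hlt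
      rw [hcast, hstep]
      exact ih (m+1) hlt (by omega)

lemma blockcntB_natCast (q : Nat) : blockcntB (q : Int) = (blockN q : Int) := by
  unfold blockcntB blockN
  rw [S_natCast q, mod_natCast100 q, mod_natCast10 q]
  by_cases hp : Pa q
  · simp [hp]
  · simp only [hp, if_false]
    by_cases h66 : q % 100 = 66
    · simp [h66]
    · have h66' : ¬ ((q % 100 : Nat) : Int) = 66 := by omega
      simp only [h66', if_false, h66]
      by_cases h6 : q % 10 = 6
      · simp [h6]
      · have h6' : ¬ ((q % 10 : Nat) : Int) = 6 := by omega
        rw [if_neg h6', if_neg h6]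
        simp

lemma outerB_eq (n : Int) :
    ∀ f (q : Nat), (CntP (1000*q) : Int) < n → n ≤ (CntP (1000*(q+f)) : Int) →
      ∃ q' : Nat, findTitleOuterB f (q : Int) (CntP (1000*q)) n
            = ((q' : Int), (CntP (1000*q') : Int))
          ∧ (CntP (1000*q') : Int) < n ∧ n ≤ (CntP (1000*(q'+1)) : Int) := by
  intro f
  induction f with
  | zero =>
    intro q hq hub
    simp only [Nat.add_zero] at hub
    omega
  | succ f ih =>
    intro q hq hub
    show ∃ q' : Nat, (if n ≤ (CntP (1000*q) : Int) + blockcntB (q:Int) then ((q:Int), (CntP (1000*q):Int))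
          else findTitleOuterB f ((q:Int)+1) ((CntP (1000*q):Int) + blockcntB (q:Int)) n)
        = (((q' : Nat) : Int), ((CntP (1000*q') : Nat) : Int)) ∧ _ ∧ _
    rw [blockcntB_natCast q]
    have hblk : (CntP (1000*q) : Int) + (blockN q : Int) = (CntP (1000*(q+1)) : Int) := by
      rw [CntP_block q]; push_cast; ring
    by_cases hstop : n ≤ (CntP (1000*q) : Int) + (blockN q : Int)
    · refine ⟨q, by rw [if_pos hstop], hq, by omega⟩
    · rw [if_neg hstop, hblk]
      have hlt : (CntP (1000*(q+1)) : Int) < n := by omega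
      have hub' : n ≤ (CntP (1000*((q+1)+f)) : Int) := by
        have he : (q+1)+f = q+(f+1) := by ring
        rw [he]; exact hub
      have hcast : ((q:Int) + 1) = ((q+1 : Nat) : Int) := by push_cast; ring
      rw [hcast]
      exact ih (q+1) hlt hub'

-- ===== VERDICT (by name: the statement is the Claim_ definition above) =====
theorem find_title_num_spec : Claim_equal_find_title_num := by
  intro n _ hpre
  have hn : 1 ≤ n := hpre
  show find_title_num n = find_title_num_alt n
  set N := n.toNat with hN
  have hN1 : 1 ≤ N := by omega
  have h : ∃ x : Nat, n ≤ (CntP (x+1) : Int) := by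
    refine ⟨1000*N - 1, ?_⟩
    have h1 : 1000*N - 1 + 1 = 1000*N := by omega
    rw [h1]
    have := CntP_lb N
    omega
  have hA : find_title_num n = (Nat.find h : Int) := by
    unfold find_title_num
    have h666 : (666 : Int) = ((666 : Nat) : Int) := by norm_num
    have hc0 : (0 : Int) = ((CntP 666 : Nat) : Int) := by rw [CntP_666]; norm_num
    rw [h666, hc0]
    apply loopA_eq n h
    · rw [CntP_666]; omega
    · have hfind : Nat.find h ≤ 1000*N - 1 := Nat.find_le (by
        have h1 : 1000*N - 1 + 1 = 1000*N := by omega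
        rw [h1]
        have := CntP_lb N
        omega)
      have hfuel : (1000 * n).toNat = 1000 * N := by omega
      omega
  have hB : find_title_num_alt n = (Nat.find h : Int) := by
    unfold find_title_num_alt
    have hq0 : (CntP (1000*0) : Int) = 0 := by norm_num [CntP]
    have houter := outerB_eq n (N+1) 0 (by rw [hq0]; omega) (by
      simp only [Nat.zero_add]
      have := CntP_lb (N+1)
      omega)
    obtain ⟨q', hq'eq, hq'lt, hq'ub⟩ := houter
    rw [show ((0:Nat) : Int) = (0:Int) from rfl] at hq'eq
    rw [show (CntP (1000*0) : Int) = (0:Int) from hq0] at hq'eq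
    rw [hq'eq]
    have hm : (1000 * ((q' : Nat) : Int)) = ((1000 * q' : Nat) : Int) := by push_cast; ring
    show findTitleInnerB 1000 (1000 * ((q' : Nat) : Int)) ((CntP (1000*q') : Nat) : Int) n = _
    rw [hm]
    apply loopB_eq n h 1000 (1000*q') hq'lt
    have hub : Nat.find h ≤ 1000*(q'+1) - 1 := Nat.find_le (by
      have h1 : 1000*(q'+1) - 1 + 1 = 1000*(q'+1) := by omega
      rw [h1]; omega)
    omega
  rw [hA, hB]
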